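-- pv_equiv track=rewrite | github.com/NobutakaShimada/ai-swing | gph_torq.py | p2m
-- ===== SOURCE A (Python) =====
-- def p2m(x):
--     F_idx = []
--     i = 0  # Pythonは0始まりのインデックス
--     while i < len(x) - 1:  # ループ内でlen(d1)-1の要素までアクセスする
--         if x[i] >= 0 and x[i+1] < 0:
--             F_idx.append(i)
--             i += 5  # インデックスで5は離れているべき
--         i += 1
--     return F_idx
-- ===== SOURCE B (Python) =====
-- def p2m(x):
--     cands = [j for j in range(len(x) - 1) if x[j] >= 0 and x[j + 1] < 0]
--     out = []
--     nxt = 0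
--     for j in cands:
--         if j >= nxt:
--             out.append(j)
--             nxt = j + 6
--     return out
-- ===== Notes on version B (the rewrite author's own statement) =====
-- stated objective: alternative
-- what changed: Replaces the single interleaved while-loop (which jumps its index by 6 after a hit) by two separated passes: a comprehension collecting all zero-crossing candidates, then a greedy threshold filter keeping a candidate only if it is at least 6 past the last kept one.
import Mathlib
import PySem

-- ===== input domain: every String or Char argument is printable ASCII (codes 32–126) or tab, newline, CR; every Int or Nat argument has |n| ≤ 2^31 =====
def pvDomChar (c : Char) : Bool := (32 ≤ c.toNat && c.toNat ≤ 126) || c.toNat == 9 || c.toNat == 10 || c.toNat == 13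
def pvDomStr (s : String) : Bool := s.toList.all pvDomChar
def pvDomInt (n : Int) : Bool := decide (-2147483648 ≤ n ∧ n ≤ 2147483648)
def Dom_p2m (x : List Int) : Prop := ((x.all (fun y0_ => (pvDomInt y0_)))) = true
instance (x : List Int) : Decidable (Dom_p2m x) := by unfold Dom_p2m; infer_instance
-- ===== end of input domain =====

-- B separates candidate detection (one filter pass) from the greedy 6-apart suppression (a threshold pass); alternative decomposition, same cost.


-- ===== PORT A =====
-- A's while-loop: index i, on a crossing append i and jump i+=5 (then i+=1).
-- i starts at 0 and only increases, so a Nat index with in-range List.getD is exact.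
def p2mLoop (x : List Int) (i : Nat) : List Int :=
  if _h : i + 1 < x.length then
    if 0 ≤ x.getD i 0 ∧ x.getD (i + 1) 0 < 0 then
      (i : Int) :: p2mLoop x (i + 6)
    else
      p2mLoop x (i + 1)
  else []
termination_by x.length - i
decreasing_by all_goals omega

def p2m (x : List Int) : List Int := p2mLoop x 0

-- ===== PORT B =====
def p2mCond (x : List Int) (j : Nat) : Bool :=
  decide (0 ≤ x.getD j 0 ∧ x.getD (j + 1) 0 < 0)

-- the for-loop over cands with accumulator (out, nxt) of Source B
def p2m_alt (x : List Int) : List Int :=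
  (((List.range (x.length - 1)).filter (p2mCond x)).foldl
    (fun (s : List Int × Nat) j => if s.2 ≤ j then (s.1 ++ [(j : Int)], j + 6) else s)
    ([], 0)).1

-- ===== PRECONDITION & SPEC =====
def Spec_p2m (x : List Int) (out : List Int) : Prop := out = p2m_alt x
instance (x : List Int) (out : List Int) : Decidable (Spec_p2m x out) := by unfold Spec_p2m; infer_instance

-- ===== CLAIM (what is proved, stated in full; the proofs are below) =====
def Claim_equal_p2m : Prop := ∀ (x : List Int), Dom_p2m x → Spec_p2m x (p2m x)

-- ===== LEMMAS AND PROOFS =====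

-- proof-side recursive view of B's threshold loop
def p2mPick (cs : List Nat) (nxt : Nat) : List Int :=
  match cs with
  | [] => []
  | j :: rest => if nxt ≤ j then (j : Int) :: p2mPick rest (j + 6) else p2mPick rest nxt

theorem p2mFold_eq_pick (cs : List Nat) (out : List Int) (nxt : Nat) :
    (cs.foldl
      (fun (s : List Int × Nat) j => if s.2 ≤ j then (s.1 ++ [(j : Int)], j + 6) else s)
      (out, nxt)).1 = out ++ p2mPick cs nxt := by
  induction cs generalizing out nxt with
  | nil => simp [p2mPick]
  | cons j rest ih =>
    by_cases hj : nxt ≤ j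
    · simp [p2mPick, hj, ih]
    · simp [p2mPick, hj, ih]

-- candidates at positions ≥ i
def p2mCandsFrom (x : List Int) (i : Nat) : List Nat :=
  (List.range' i (x.length - 1 - i)).filter (p2mCond x)

-- if every element of cs is ≥ m, thresholds n ≤ m act identically
theorem p2mPick_congr (cs : List Nat) (m n : Nat) (hn : n ≤ m)
    (h : ∀ j ∈ cs, m ≤ j) : p2mPick cs n = p2mPick cs m := by
  cases cs with
  | nil => rfl
  | cons j rest =>
    have hj : m ≤ j := h j (by simp)
    simp [p2mPick, Nat.le_trans hn hj, hj]

-- candidates below the threshold are skipped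
theorem p2mPick_drop (x : List Int) (a nxt : Nat) (h : a ≤ nxt) :
    p2mPick (p2mCandsFrom x a) nxt = p2mPick (p2mCandsFrom x nxt) nxt := by
  induction hk : nxt - a generalizing a with
  | zero =>
    have heq : a = nxt := by omega
    rw [heq]
  | succ k ih =>
    have ha : a < nxt := by omega
    by_cases hlen : a + 1 < x.length
    · have hsplit : x.length - 1 - a = (x.length - 1 - (a + 1)) + 1 := by omega
      have : p2mCandsFrom x a =
          (if p2mCond x a then (a :: p2mCandsFrom x (a+1)) else p2mCandsFrom x (a+1)) := by
        simp only [p2mCandsFrom, hsplit, List.range'_succ, List.filter_cons]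
      rw [this]
      have htail : p2mPick (p2mCandsFrom x (a+1)) nxt = p2mPick (p2mCandsFrom x nxt) nxt :=
        ih (a + 1) (by omega) (by omega)
      split
      · simp [p2mPick, Nat.not_le.mpr ha, htail]
      · exact htail
    · have h1 : x.length - 1 - a = 0 := by omega
      have h2 : x.length - 1 - nxt = 0 := by omega
      simp [p2mCandsFrom, h1, h2]

theorem p2mLoop_eq_pick (x : List Int) (i : Nat) :
    p2mLoop x i = p2mPick (p2mCandsFrom x i) i := by
  induction hk : x.length - i using Nat.strong_induction_on generalizing i with
  | _ k ih =>
    by_cases hlen : i + 1 < x.length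
    · have hsplit : x.length - 1 - i = (x.length - 1 - (i + 1)) + 1 := by omega
      have hcs : p2mCandsFrom x i =
          (if p2mCond x i then (i :: p2mCandsFrom x (i+1)) else p2mCandsFrom x (i+1)) := by
        simp only [p2mCandsFrom, hsplit, List.range'_succ, List.filter_cons]
      rw [p2mLoop, dif_pos hlen, hcs]
      by_cases hc : 0 ≤ x.getD i 0 ∧ x.getD (i + 1) 0 < 0
      · have hcb : p2mCond x i = true := decide_eq_true hc
        rw [if_pos hc, if_pos hcb]
        have h6 : p2mLoop x (i + 6) = p2mPick (p2mCandsFrom x (i + 6)) (i + 6) :=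
          ih (x.length - (i + 6)) (by omega) (i + 6) rfl
        simp only [p2mPick, if_pos (Nat.le_refl i)]
        rw [h6, ← p2mPick_drop x (i + 1) (i + 6) (by omega)]
      · have hcb : p2mCond x i = false := decide_eq_false hc
        rw [if_neg hc, if_neg (by simp [hcb])]
        have h1 : p2mLoop x (i + 1) = p2mPick (p2mCandsFrom x (i + 1)) (i + 1) :=
          ih (x.length - (i + 1)) (by omega) (i + 1) rfl
        rw [h1]
        refine (p2mPick_congr _ (i + 1) i (by omega) ?_).symm
        intro j hj
        simp only [p2mCandsFrom, List.mem_filter, List.mem_range'_1] at hj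
        omega
    · have h0 : x.length - 1 - i = 0 := by omega
      rw [p2mLoop, dif_neg hlen]
      simp [p2mCandsFrom, h0, p2mPick]

-- ===== VERDICT (by name: the statement is the Claim_ definition above) =====
theorem p2m_spec : Claim_equal_p2m := by
  intro x _
  show p2m x = p2m_alt x
  rw [p2m, p2mLoop_eq_pick, p2m_alt, p2mFold_eq_pick]
  simp only [List.nil_append]
  congr 1
  simp [p2mCandsFrom, List.range_eq_range']
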